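-- pv_equiv track=rewrite | github.com/MrBrantCode/unitest_baseline | mut_generate/mist_train_cf/cf_50843/solution.py | reverse_alphabets_in_words
-- ===== SOURCE A (Python) =====
-- def reverse_alphabets_in_words(text):
--     # Split the string into words
--     words = text.split(' ')
--
--     reversed_words = []
--
--     # Reverse the alphabetic characters in each word
--     for word in words:
--         chars = list(word)
--         l, r = 0, len(chars) - 1
--         while l < r:
--             if not chars[l].isalpha():
--                 l += 1
--             elif not chars[r].isalpha():
--                 r -= 1
--             else:
--                 # Swap letters at positions "l" and "r"
--                 chars[l], chars[r] = chars[r], chars[l]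
--                 l += 1
--                 r -= 1
--         reversed_words.append(''.join(chars))
--
--     # Join the words back together into a sentence and return
--     return ' '.join(reversed_words)
-- ===== SOURCE B (Python) =====
-- def reverse_alphabets_in_words(text):
--     out = []
--     for word in text.split(' '):
--         # reversed alphabetic characters of the word, consumed left to right
--         letters = iter([c for c in word if c.isalpha()][::-1])
--         out.append(''.join(next(letters) if c.isalpha() else c for c in word))
--     return ' '.join(out)
-- ===== Notes on version B (the rewrite author's own statement) =====
-- stated objective: simpler
-- what changed: Replaces the converging two-pointer in-place swap per word with a two-pass rebuild: collect the word's alphabetic characters, reverse them, and refill them into the alpha positions left to right.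
import Mathlib
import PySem

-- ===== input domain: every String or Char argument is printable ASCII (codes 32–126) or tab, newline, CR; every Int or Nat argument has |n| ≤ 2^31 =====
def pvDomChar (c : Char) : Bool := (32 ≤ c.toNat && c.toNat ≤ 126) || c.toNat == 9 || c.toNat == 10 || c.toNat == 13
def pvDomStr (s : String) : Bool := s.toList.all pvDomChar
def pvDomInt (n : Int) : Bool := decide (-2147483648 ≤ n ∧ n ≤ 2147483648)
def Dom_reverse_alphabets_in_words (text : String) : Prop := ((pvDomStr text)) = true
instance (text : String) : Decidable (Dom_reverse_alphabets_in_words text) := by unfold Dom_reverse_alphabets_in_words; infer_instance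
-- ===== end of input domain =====

-- B replaces A's converging two-pointer in-place swap by a filter-reverse-refill pass per word
-- (objective: simpler); same return value on every input.

-- ===== PORT A =====
-- the while loop: l/r converge, swapping alphabetic characters; indices are always in
-- range when read/written (0 ≤ l < r < len), so the total pyGetD/pySetD forms are exact
def pvLoopA (chars : List Char) (l r : Int) : List Char :=
  if l < r then
    if ¬ PySem.Chars.isalpha (PySem.List.pyGetD chars l ' ') then
      pvLoopA chars (l + 1) r
    else if ¬ PySem.Chars.isalpha (PySem.List.pyGetD chars r ' ') then
      pvLoopA chars l (r - 1)
    else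
      -- chars[l], chars[r] = chars[r], chars[l]  (RHS read first)
      pvLoopA
        (PySem.List.pySetD (PySem.List.pySetD chars l (PySem.List.pyGetD chars r ' '))
          r (PySem.List.pyGetD chars l ' '))
        (l + 1) (r - 1)
  else chars
termination_by (r - l).toNat
decreasing_by all_goals omega

def reverse_alphabets_in_words (text : String) : String :=
  let words := PySem.Chars.splitOn text.toList [' ']
  let reversed_words :=
    words.foldl
      (fun acc word =>
        let chars := word
        acc ++ [pvLoopA chars 0 ((chars.length : Int) - 1)])
      ([] : List (List Char))
  String.ofList (PySem.Chars.join [' '] reversed_words)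

-- ===== PORT B =====
-- ''.join(next(letters) if c.isalpha() else c for c in word): consume the reversed
-- letters left to right; the alpha-with-no-letter-left case never occurs (counts match)
def pvFill : List Char → List Char → List Char
  | [], _ => []
  | c :: cs, ls =>
    if PySem.Chars.isalpha c then
      match ls with
      | l :: ls' => l :: pvFill cs ls'
      | [] => c :: pvFill cs []   -- unreachable
    else c :: pvFill cs ls

def reverse_alphabets_in_words_alt (text : String) : String :=
  String.ofList (PySem.Chars.join [' ']
    ((PySem.Chars.splitOn text.toList [' ']).map
      (fun word => pvFill word ((word.filter PySem.Chars.isalpha).reverse))))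

-- ===== PRECONDITION & SPEC =====
def Spec_reverse_alphabets_in_words (text : String) (out : String) : Prop := out = reverse_alphabets_in_words_alt text
instance (text : String) (out : String) : Decidable (Spec_reverse_alphabets_in_words text out) := by unfold Spec_reverse_alphabets_in_words; infer_instance

-- ===== CLAIM (what is proved, stated in full; the proofs are below) =====
def Claim_equal_reverse_alphabets_in_words : Prop := ∀ (text : String), Dom_reverse_alphabets_in_words text → Spec_reverse_alphabets_in_words text (reverse_alphabets_in_words text)

-- ===== LEMMAS AND PROOFS =====

-- B's per-word result, as a function of the word
def pvRevAlpha (xs : List Char) : List Char :=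
  pvFill xs ((xs.filter PySem.Chars.isalpha).reverse)

theorem pvFill_append (xs : List Char) : ∀ (ys ls ms : List Char),
    ls.length = (xs.filter PySem.Chars.isalpha).length →
    pvFill (xs ++ ys) (ls ++ ms) = pvFill xs ls ++ pvFill ys ms := by
  induction xs with
  | nil =>
    intro ys ls ms h
    simp at h
    subst h
    simp [pvFill]
  | cons c cs ih =>
    intro ys ls ms h
    by_cases hc : PySem.Chars.isalpha c
    · simp [hc] at h
      cases ls with
      | nil => simp at h
      | cons l ls' =>
        simp at h
        simp [pvFill, hc, ih ys ls' ms h]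
    · simp [hc] at h
      simp [pvFill, hc, ih ys ls ms h]

theorem pvRevAlpha_short (xs : List Char) (h : xs.length ≤ 1) : pvRevAlpha xs = xs := by
  match xs with
  | [] => simp [pvRevAlpha, pvFill]
  | [c] =>
    by_cases hc : PySem.Chars.isalpha c <;>
      simp [pvRevAlpha, pvFill, hc]
  | _ :: _ :: _ => simp at h

theorem pvRevAlpha_cons_not (a : Char) (xs : List Char)
    (ha : PySem.Chars.isalpha a = false) :
    pvRevAlpha (a :: xs) = a :: pvRevAlpha xs := by
  simp [pvRevAlpha, pvFill, ha]

theorem pvFill_cons_alpha (c : Char) (cs : List Char) (l : Char) (ls : List Char)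
    (hc : PySem.Chars.isalpha c = true) :
    pvFill (c :: cs) (l :: ls) = l :: pvFill cs ls := by
  simp [pvFill, hc]

theorem pvRevAlpha_snoc_not (xs : List Char) (z : Char)
    (hz : PySem.Chars.isalpha z = false) :
    pvRevAlpha (xs ++ [z]) = pvRevAlpha xs ++ [z] := by
  have hf : (xs ++ [z]).filter PySem.Chars.isalpha = xs.filter PySem.Chars.isalpha := by
    simp [List.filter_append, hz]
  unfold pvRevAlpha
  rw [hf, show (xs.filter PySem.Chars.isalpha).reverse
        = (xs.filter PySem.Chars.isalpha).reverse ++ [] by simp,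
    pvFill_append xs [z] _ [] (by simp)]
  simp [pvFill]

theorem pvRevAlpha_both (a z : Char) (mid : List Char)
    (ha : PySem.Chars.isalpha a = true) (hz : PySem.Chars.isalpha z = true) :
    pvRevAlpha ((a :: mid) ++ [z]) = z :: pvRevAlpha mid ++ [a] := by
  have hf : ((a :: mid) ++ [z]).filter PySem.Chars.isalpha
      = a :: (mid.filter PySem.Chars.isalpha ++ [z]) := by
    simp [List.filter_append, ha, hz]
  unfold pvRevAlpha
  rw [hf, show (a :: (mid.filter PySem.Chars.isalpha ++ [z])).reverse
        = z :: ((mid.filter PySem.Chars.isalpha).reverse ++ [a]) by simp,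
    show (a :: mid) ++ [z] = a :: (mid ++ [z]) by simp,
    pvFill_cons_alpha _ _ _ _ ha,
    pvFill_append mid [z] _ [a] (by simp),
    pvFill_cons_alpha _ _ _ _ hz]
  simp [pvFill]

theorem set_len {α : Type} (pre rest : List α) (b v : α) :
    (pre ++ b :: rest).set pre.length v = pre ++ v :: rest := by
  induction pre with
  | nil => simp
  | cons x xs ih => simp [ih]

-- the two-pointer loop on the window [pre.length, pre.length + win.length - 1]
-- rewrites the window to pvRevAlpha win and leaves pre/post untouched
theorem pvLoopA_window : ∀ (n : Nat) (win pre post : List Char), win.length ≤ n →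
    pvLoopA (pre ++ win ++ post) (pre.length : Int)
        ((pre.length : Int) + (win.length : Int) - 1)
      = pre ++ pvRevAlpha win ++ post := by
  intro n
  induction n with
  | zero =>
    intro win pre post h
    have hw : win = [] := List.eq_nil_of_length_eq_zero (Nat.le_zero.mp h)
    subst hw
    rw [pvLoopA]
    simp [pvRevAlpha, pvFill]
  | succ n ih =>
    intro win pre post h
    by_cases hlen : win.length ≤ 1
    · rw [pvLoopA]
      rw [if_neg (by omega)]
      rw [pvRevAlpha_short win hlen]
    · -- win = a :: mid ++ [z]
      rw [Nat.not_le] at hlen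
      obtain ⟨a, t, rfl⟩ : ∃ a t, win = a :: t := by
        cases win with
        | nil => simp at hlen
        | cons a t => exact ⟨a, t, rfl⟩
      have ht : t ≠ [] := by intro h0; subst h0; simp at hlen
      obtain ⟨mid, z, rfl⟩ : ∃ mid z, t = mid ++ [z] := by
        refine ⟨t.dropLast, t.getLast ht, ?_⟩
        exact (List.dropLast_append_getLast ht).symm
      have hget_l : PySem.List.pyGetD (pre ++ (a :: (mid ++ [z])) ++ post)
          (pre.length : Int) ' ' = a := by
        rw [List.append_assoc, PySem.List.pyGetD_natCast]
        simp [List.getD_eq_getElem?_getD]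
      have harith : (pre.length : Int) + ((a :: (mid ++ [z])).length : Int) - 1
          = ((pre ++ (a :: mid)).length : Nat) := by simp; ring
      have hget_r : PySem.List.pyGetD (pre ++ (a :: (mid ++ [z])) ++ post)
          ((pre.length : Int) + ((a :: (mid ++ [z])).length : Int) - 1) ' ' = z := by
        rw [harith, PySem.List.pyGetD_natCast]
        have : pre ++ (a :: (mid ++ [z])) ++ post = (pre ++ a :: mid) ++ z :: post := by simp
        rw [this]
        simp [List.getD_eq_getElem?_getD]
      rw [pvLoopA]
      rw [if_pos (by simp; omega)]
      rw [hget_l, hget_r]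
      by_cases ha : PySem.Chars.isalpha a
      · rw [if_neg (by simp [ha])]
        by_cases hz : PySem.Chars.isalpha z
        · -- both alphabetic: swap, recurse on mid
          rw [if_neg (by simp [hz])]
          have hset : PySem.List.pySetD
              (PySem.List.pySetD (pre ++ (a :: (mid ++ [z])) ++ post) (pre.length : Int) z)
              ((pre.length : Int) + ((a :: (mid ++ [z])).length : Int) - 1) a
              = (pre ++ [z]) ++ mid ++ ([a] ++ post) := by
            rw [PySem.List.pySetD_natCast, harith, PySem.List.pySetD_natCast]
            rw [show pre ++ (a :: (mid ++ [z])) ++ post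
                  = pre ++ a :: ((mid ++ [z]) ++ post) by simp]
            rw [set_len]
            rw [show pre ++ z :: ((mid ++ [z]) ++ post)
                  = (pre ++ z :: mid) ++ z :: post by simp]
            rw [show ((pre ++ a :: mid).length : Nat) = (pre ++ z :: mid).length by simp]
            rw [set_len]
            simp
          rw [hset]
          have hl1 : (pre.length : Int) + 1 = (((pre ++ [z]).length : Nat) : Int) := by
            simp
          have hr1 : (pre.length : Int) + ((a :: (mid ++ [z])).length : Int) - 1 - 1
              = (((pre ++ [z]).length : Nat) : Int) + ((mid.length : Nat) : Int) - 1 := by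
            simp; ring
          rw [hl1, hr1, ih mid (pre ++ [z]) ([a] ++ post) (by simp at h ⊢; omega)]
          rw [show a :: (mid ++ [z]) = (a :: mid) ++ [z] by simp]
          rw [pvRevAlpha_both a z mid ha hz]
          simp
        · -- right end not alphabetic: r -= 1
          rw [if_pos (by simp [hz])]
          have hr1 : (pre.length : Int) + ((a :: (mid ++ [z])).length : Int) - 1 - 1
              = (pre.length : Int) + (((a :: mid).length : Nat) : Int) - 1 := by
            simp; ring
          have hsplit : pre ++ (a :: (mid ++ [z])) ++ post
              = pre ++ (a :: mid) ++ ([z] ++ post) := by simp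
          rw [hr1, hsplit, ih (a :: mid) pre ([z] ++ post) (by simp at h ⊢; omega)]
          rw [show a :: (mid ++ [z]) = (a :: mid) ++ [z] by simp]
          rw [pvRevAlpha_snoc_not (a :: mid) z (by simpa using hz)]
          simp
      · -- left end not alphabetic: l += 1
        rw [if_pos (by simp [ha])]
        have hl1 : (pre.length : Int) + 1 = (((pre ++ [a]).length : Nat) : Int) := by simp
        have hr1 : (pre.length : Int) + ((a :: (mid ++ [z])).length : Int) - 1
            = (((pre ++ [a]).length : Nat) : Int) + (((mid ++ [z]).length : Nat) : Int) - 1 := by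
          simp; ring
        have hsplit : pre ++ (a :: (mid ++ [z])) ++ post
            = (pre ++ [a]) ++ (mid ++ [z]) ++ post := by simp
        conv_lhs => rw [hr1, hsplit, hl1]
        rw [ih (mid ++ [z]) (pre ++ [a]) post (by simp at h ⊢; omega)]
        rw [pvRevAlpha_cons_not a (mid ++ [z]) (by simpa using ha)]
        simp

theorem pvLoopA_eq_pvRevAlpha (cs : List Char) :
    pvLoopA cs 0 ((cs.length : Int) - 1) = pvRevAlpha cs := by
  have := pvLoopA_window cs.length cs [] [] (Nat.le_refl _)
  simpa using this

-- ===== VERDICT (by name: the statement is the Claim_ definition above) =====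
theorem reverse_alphabets_in_words_spec : Claim_equal_reverse_alphabets_in_words := by
  intro text _
  unfold Spec_reverse_alphabets_in_words reverse_alphabets_in_words reverse_alphabets_in_words_alt
  simp only [PySem.List.foldl_append_singleton_eq_map, List.nil_append]
  congr 1
  congr 1
  apply List.map_congr_left
  intro word _
  exact pvLoopA_eq_pvRevAlpha word
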